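-- pv_equiv track=rewrite | github.com/imraflip/WhatsOnThisDomain | wotd/parsers.py | normalize_hosts
-- ===== SOURCE A (Python) =====
-- def normalize_hosts(hosts: list[str]) -> list[str]:
--     """Lowercase, strip whitespace, drop trailing dots, dedupe, sort."""
--     seen: set[str] = set()
--     out: list[str] = []
--     for h in hosts:
--         h = h.strip().lower().rstrip(".")
--         if h and h not in seen:
--             seen.add(h)
--             out.append(h)
--     return sorted(out)
-- ===== SOURCE B (Python) =====
-- def normalize_hosts(hosts: list[str]) -> list[str]:
--     """Sort-first strategy: normalize all hosts, sort, then collapse adjacent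
--     duplicates in one linear pass (no membership set)."""
--     cleaned = sorted(h.strip().lower().rstrip(".") for h in hosts)
--     out: list[str] = []
--     for h in cleaned:
--         if h and (not out or out[-1] != h):
--             out.append(h)
--     return out
-- ===== Notes on version B (the rewrite author's own statement) =====
-- stated objective: alternative
-- what changed: Replaces A's per-element seen-set membership dedup followed by a final sort with a sort-first strategy: normalize all hosts, sort them, then collapse adjacent duplicates (and empties) in one linear pass comparing each element only to the last emitted one — no membership set at all.
import Mathlib
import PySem

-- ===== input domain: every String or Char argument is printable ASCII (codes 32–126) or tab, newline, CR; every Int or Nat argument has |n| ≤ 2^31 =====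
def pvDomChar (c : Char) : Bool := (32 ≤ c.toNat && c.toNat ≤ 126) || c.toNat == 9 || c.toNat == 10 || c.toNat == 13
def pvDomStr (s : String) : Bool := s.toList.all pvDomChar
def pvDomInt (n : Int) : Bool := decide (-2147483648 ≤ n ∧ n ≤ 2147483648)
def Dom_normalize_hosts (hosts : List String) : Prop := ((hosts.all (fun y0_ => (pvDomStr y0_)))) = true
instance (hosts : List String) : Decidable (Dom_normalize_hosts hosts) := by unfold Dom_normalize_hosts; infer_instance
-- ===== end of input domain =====

-- B replaces A's per-element set-membership dedup (then sort) by sort-first plus a single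
-- adjacent-duplicate-collapsing pass; objective: alternative decomposition, same result.

-- shared normalization helper: h.strip().lower().rstrip(".")
-- rstrip(".") is ported by hand (PySem has no rstrip-with-chars): drop trailing '.' code
-- points — exact, since rstrip(".") removes exactly the maximal trailing run of '.'.
def pvNorm (s : String) : String :=
  String.ofList (((PySem.Str.lower (PySem.Str.strip s)).toList.reverse.dropWhile (fun c => c == '.')).reverse)

-- ===== PORT A =====
def normalize_hosts (hosts : List String) : List String :=
  PySem.List.sorted
    (hosts.foldl
      (fun (acc : PySem.Set String × List String) h0 =>
        if (pvNorm h0 != "" && !(PySem.Set.contains acc.1 (pvNorm h0))) = true then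
          (PySem.Set.add acc.1 (pvNorm h0), acc.2 ++ [pvNorm h0])
        else acc)
      (PySem.Set.empty, [])).2
    (fun x => x)

-- ===== PORT B =====
def normalize_hosts_alt (hosts : List String) : List String :=
  (PySem.List.sorted (hosts.map (fun h => pvNorm h)) (fun x => x)).foldl
    (fun (out : List String) h =>
      if (h != "" && (out.isEmpty || (PySem.List.pyGet? out (-1) != some h))) = true then
        out ++ [h]
      else out)
    []

-- ===== PRECONDITION & SPEC =====
def Spec_normalize_hosts (hosts : List String) (out : List String) : Prop := out = normalize_hosts_alt hosts
instance (hosts : List String) (out : List String) : Decidable (Spec_normalize_hosts hosts out) := by unfold Spec_normalize_hosts; infer_instance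

-- ===== CLAIM (what is proved, stated in full; the proofs are below) =====
def Claim_equal_normalize_hosts : Prop := ∀ (hosts : List String), Dom_normalize_hosts hosts → Spec_normalize_hosts hosts (normalize_hosts hosts)

-- ===== LEMMAS AND PROOFS =====

-- A's loop: the pair (seen, out) stays equal componentwise, and equals folding Set.add
-- over the nonempty normalized elements.
theorem pvA_fold (xs : List String) (s : List String) :
    xs.foldl
      (fun (acc : PySem.Set String × List String) h0 =>
        if (pvNorm h0 != "" && !(PySem.Set.contains acc.1 (pvNorm h0))) = true then
          (PySem.Set.add acc.1 (pvNorm h0), acc.2 ++ [pvNorm h0])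
        else acc)
      (s, s)
    = (((xs.map (fun h => pvNorm h)).filter (fun h => h != "")).foldl PySem.Set.add s,
       ((xs.map (fun h => pvNorm h)).filter (fun h => h != "")).foldl PySem.Set.add s) := by
  induction xs generalizing s with
  | nil => simp
  | cons h t ih =>
    rw [List.foldl_cons, List.map_cons, List.filter_cons]
    by_cases hne : (pvNorm h != "") = true
    · by_cases hc : PySem.Set.contains s (pvNorm h) = true
      · have hcond : (pvNorm h != "" && !(PySem.Set.contains s (pvNorm h))) = false := by
          rw [hne, hc]; rfl
        have hmem : pvNorm h ∈ s := by simpa [PySem.Set.contains] using hc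
        have h2 : PySem.Set.add s (pvNorm h) = s := by
          simp [PySem.Set.add, PySem.Set.contains, hmem]
        rw [if_neg (by rw [hcond]; simp), if_pos hne, List.foldl_cons, h2]
        exact ih s
      · have hcb : PySem.Set.contains s (pvNorm h) = false := by
          cases hcc : PySem.Set.contains s (pvNorm h)
          · rfl
          · exact absurd hcc hc
        have hcond : (pvNorm h != "" && !(PySem.Set.contains s (pvNorm h))) = true := by
          rw [hne, hcb]; rfl
        have hmem : pvNorm h ∉ s := by simpa [PySem.Set.contains] using hcb
        have h2 : PySem.Set.add s (pvNorm h) = s ++ [pvNorm h] := by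
          simp [PySem.Set.add, PySem.Set.contains, hmem]
        rw [if_pos hcond, if_pos hne, List.foldl_cons, h2]
        exact ih (s ++ [pvNorm h])
    · have hnb : (pvNorm h != "") = false := by
        cases hcc : (pvNorm h != "")
        · rfl
        · exact absurd hcc hne
      have hcond : (pvNorm h != "" && !(PySem.Set.contains s (pvNorm h))) = false := by
        rw [hnb]; rfl
      rw [if_neg (by rw [hcond]; simp), if_neg (by rw [hnb]; simp)]
      exact ih s

theorem pvA_eq (hosts : List String) :
    normalize_hosts hosts
    = PySem.List.sorted
        (PySem.Set.ofList ((hosts.map (fun h => pvNorm h)).filter (fun h => h != "")))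
        (fun x => x) := by
  unfold normalize_hosts
  rw [show (PySem.Set.empty : PySem.Set String) = ([] : List String) from rfl]
  rw [pvA_fold, PySem.Set.ofList_eq_foldl]

-- out[-1] of a nonempty list is its last element
theorem pvGetLastNeg (out : List String) (h : out ≠ []) :
    PySem.List.pyGet? out (-1) = out.getLast? := by
  have hlen : 0 < out.length := List.length_pos_iff.mpr h
  unfold PySem.List.pyGet? PySem.List.pyIdx?
  rw [if_neg (by omega), if_pos (by omega : -(out.length : Int) ≤ -1)]
  simp [List.getLast?_eq_getElem?]

-- in a ≤-sorted list, every member is ≤ the last element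
theorem pvLeGetLast (out : List String) (hp : out.Pairwise (· ≤ ·)) (x : String)
    (hx : x ∈ out) (hne : out ≠ []) : x ≤ out.getLast hne := by
  induction out with
  | nil => cases hx
  | cons a t ih =>
    rcases List.mem_cons.mp hx with rfl | hx'
    · cases t with
      | nil => simp [List.getLast]
      | cons b u =>
        have hmem : (b :: u).getLast (by simp) ∈ b :: u := List.getLast_mem _
        have : x ≤ (b :: u).getLast (by simp) := (List.pairwise_cons.mp hp).1 _ hmem
        simpa [List.getLast_cons] using this
    · have ht : t ≠ [] := by intro hh; subst hh; cases hx'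
      have := ih (List.pairwise_cons.mp hp).2 hx' ht
      simpa [List.getLast_cons ht] using this

-- B's loop on a ≤-sorted remainder equals folding Set.add over the nonempty elements
theorem pvB_fold (c : List String) (out : List String)
    (hc : c.Pairwise (· ≤ ·)) (hout : out.Pairwise (· ≤ ·))
    (hord : ∀ x ∈ out, ∀ y ∈ c, x ≤ y) :
    c.foldl
      (fun (out : List String) h =>
        if (h != "" && (out.isEmpty || (PySem.List.pyGet? out (-1) != some h))) = true then
          out ++ [h]
        else out)
      out
    = (c.filter (fun h => h != "")).foldl PySem.Set.add out := by
  induction c generalizing out with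
  | nil => simp
  | cons h t ih =>
    have hct := (List.pairwise_cons.mp hc).2
    have hch := (List.pairwise_cons.mp hc).1
    rw [List.foldl_cons, List.filter_cons]
    by_cases hne : (h != "") = true
    · by_cases hout0 : out = []
      · subst hout0
        have hcond : (h != "" && (List.isEmpty ([] : List String) ||
            (PySem.List.pyGet? ([] : List String) (-1) != some h))) = true := by
          rw [hne]; rfl
        rw [if_pos hcond, if_pos hne, List.foldl_cons,
          show PySem.Set.add ([] : List String) h = [h] from rfl, List.nil_append]
        exact ih [h] hct (by simp)
          (fun x hx y hy => by
            rw [List.mem_singleton] at hx; subst hx; exact hch y hy)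
      · have hie : out.isEmpty = false := by
          cases out
          · exact absurd rfl hout0
          · rfl
        have hlast : PySem.List.pyGet? out (-1) = out.getLast? := pvGetLastNeg out hout0
        have hle_h : ∀ x ∈ out, x ≤ h := fun x hx => hord x hx h (by simp)
        by_cases hmem : h ∈ out
        · -- h already present: everything in out is ≤ h and out is sorted, so h is the last
          have hle1 : out.getLast hout0 ≤ h := hle_h _ (List.getLast_mem hout0)
          have hle2 : h ≤ out.getLast hout0 := pvLeGetLast out hout h hmem hout0
          have heq : out.getLast? = some h := by
            rw [List.getLast?_eq_some_getLast hout0]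
            exact congrArg some (le_antisymm hle1 hle2)
          have hcond : (h != "" && (out.isEmpty ||
              (PySem.List.pyGet? out (-1) != some h))) = false := by
            rw [hne, hie, hlast, heq]; simp
          have h2 : PySem.Set.add out h = out := by
            simp [PySem.Set.add, PySem.Set.contains, hmem]
          rw [if_neg (by rw [hcond]; simp), if_pos hne, List.foldl_cons, h2]
          exact ih out hct hout (fun x hx y hy => hord x hx y (List.mem_cons_of_mem _ hy))
        · -- h is new: its value differs from the last, both sides append
          have hneq : out.getLast? ≠ some h := by
            intro hh
            rw [List.getLast?_eq_some_getLast hout0] at hh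
            exact hmem ((Option.some_injective _ hh) ▸ List.getLast_mem hout0)
          have hcond : (h != "" && (out.isEmpty ||
              (PySem.List.pyGet? out (-1) != some h))) = true := by
            rw [hne, hie, hlast]; simp [hneq]
          have h2 : PySem.Set.add out h = out ++ [h] := by
            simp [PySem.Set.add, PySem.Set.contains, hmem]
          have hp' : (out ++ [h]).Pairwise (· ≤ ·) := by
            rw [List.pairwise_append]
            refine ⟨hout, by simp, ?_⟩
            intro x hx y hy
            rw [List.mem_singleton] at hy; subst hy
            exact hle_h x hx
          have hinv' : ∀ x ∈ out ++ [h], ∀ y ∈ t, x ≤ y := by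
            intro x hx y hy
            rcases List.mem_append.mp hx with hx' | hx'
            · exact hord x hx' y (List.mem_cons_of_mem _ hy)
            · rw [List.mem_singleton] at hx'; subst hx'; exact hch y hy
          rw [if_pos hcond, if_pos hne, List.foldl_cons, h2]
          exact ih (out ++ [h]) hct hp' hinv'
    · have hnb : (h != "") = false := by
        cases hcc : (h != "")
        · rfl
        · exact absurd hcc hne
      have hcond : (h != "" && (out.isEmpty ||
          (PySem.List.pyGet? out (-1) != some h))) = false := by
        rw [hnb]; rfl
      rw [if_neg (by rw [hcond]; simp), if_neg (by rw [hnb]; simp)]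
      exact ih out hct hout (fun x hx y hy => hord x hx y (List.mem_cons_of_mem _ hy))

-- Set.ofList is a sublist of its argument (first occurrences, in order)
theorem pvOfListSublist (xs : List String) : (PySem.Set.ofList xs).Sublist xs := by
  induction xs with
  | nil => simp [PySem.Set.ofList]
  | cons x t ih =>
    rw [PySem.Set.ofList_cons]
    exact List.Sublist.cons₂ x ((List.filter_sublist).trans ih)

theorem pvPairwiseLt (ys : List String) (hle : ys.Pairwise (· ≤ ·)) (hnd : ys.Nodup) :
    ys.Pairwise (· < ·) :=
  (hle.and hnd).imp (fun ⟨h1, h2⟩ => lt_of_le_of_ne h1 h2)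

theorem pvB_eq (hosts : List String) :
    normalize_hosts_alt hosts
    = PySem.Set.ofList
        ((PySem.List.sorted (hosts.map (fun h => pvNorm h)) (fun x => x)).filter
          (fun h => h != "")) := by
  unfold normalize_hosts_alt
  rw [pvB_fold _ _ (PySem.List.sorted_pairwise _ _) (by simp) (by simp)]
  rw [PySem.Set.ofList_eq_foldl]

-- ===== VERDICT (by name: the statement is the Claim_ definition above) =====
theorem normalize_hosts_spec : Claim_equal_normalize_hosts := by
  intro hosts _
  unfold Spec_normalize_hosts
  rw [pvA_eq, pvB_eq]
  set xs := hosts.map (fun h => pvNorm h) with hxs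
  set ys := PySem.Set.ofList ((PySem.List.sorted xs (fun x => x)).filter (fun h => h != "")) with hys
  apply PySem.List.sorted_eq_of_perm_of_pairwise_lt
  · -- permutation: both are nodup lists with the same elements
    rw [List.perm_ext_iff_of_nodup (PySem.Set.nodup_ofList _) (PySem.Set.nodup_ofList _)]
    intro a
    rw [PySem.Set.mem_ofList, PySem.Set.mem_ofList, List.mem_filter, List.mem_filter]
    constructor
    · rintro ⟨ha, hb⟩
      exact ⟨(PySem.List.sorted_perm xs (fun x => x) false).mem_iff.mp ha, hb⟩
    · rintro ⟨ha, hb⟩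
      exact ⟨(PySem.List.sorted_perm xs (fun x => x) false).mem_iff.mpr ha, hb⟩
  · -- strictly increasing: sublist of a sorted list, and nodup
    apply pvPairwiseLt _ _ (PySem.Set.nodup_ofList _)
    exact List.Pairwise.sublist ((pvOfListSublist _).trans List.filter_sublist)
      (PySem.List.sorted_pairwise xs (fun x => x))
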